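-- pv_equiv track=rewrite | github.com/rblis/leetcode | Online Assesments/Amazon.py | predictDays
-- ===== SOURCE A (Python) =====
-- def predictDays(day, k):
--     # Write your code here
--     ans = []
--     candidates = set()
--     days = 0
--     for i in range(1, len(day)):
--         if day[i] <= day[i-1]:
--             days += 1
--             if days >= k:
--                 candidates.add(i)
--         else:
--             days = 0
--     days = 0
--     for i in range(len(day)-2, -1, -1):
--         if day[i] <= day[i+1]:
--             days += 1
--             if days >= k and i in candidates:
--                 ans.append(i+1)
--         else:
--             days = 0
--     ans.reverse()
--     return ans
-- ===== SOURCE B (Python) =====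
-- def predictDays(day, k):
--     n = len(day)
--     asc = [0]  # asc[j] = number of t in 1..j with day[t] > day[t-1]
--     for j in range(1, n):
--         asc.append(asc[-1] + (day[j] > day[j-1]))
--     dsc = [0]  # dsc[j] = number of t in 0..j-1 with day[t] > day[t+1]
--     for j in range(1, n):
--         dsc.append(dsc[-1] + (day[j-1] > day[j]))
--     ans = []
--     for i in range(k, n - k):
--         if asc[i] == asc[i-k] and dsc[i+k] == dsc[i]:
--             ans.append(i + 1)
--     return ans
-- ===== Notes on version B (the rewrite author's own statement) =====
-- stated objective: alternative
-- what changed: Replaces A's run-length counters, candidate set and reversed backward collecting pass by prefix counts of monotonicity violations (ascents/descents): an index qualifies iff a constant-time window subtraction shows zero violations in the k-windows on each side, collected in one ascending loop over range(k, n-k).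
-- outside the precondition, e.g. on predictDays([1, 2, 1], 0): A returns [], B returns [1, 2, 3]
import Mathlib
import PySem

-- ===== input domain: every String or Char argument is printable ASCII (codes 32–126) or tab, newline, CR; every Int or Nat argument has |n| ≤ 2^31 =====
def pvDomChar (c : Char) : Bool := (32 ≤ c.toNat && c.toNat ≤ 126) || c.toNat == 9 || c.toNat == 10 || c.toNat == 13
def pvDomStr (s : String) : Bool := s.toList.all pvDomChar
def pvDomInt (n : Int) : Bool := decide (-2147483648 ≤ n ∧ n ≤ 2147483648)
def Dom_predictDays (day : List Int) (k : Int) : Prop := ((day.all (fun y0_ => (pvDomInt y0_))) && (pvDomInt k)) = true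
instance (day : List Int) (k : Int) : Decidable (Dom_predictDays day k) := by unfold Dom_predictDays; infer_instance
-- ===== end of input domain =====

-- B replaces A's run-length counters, candidate set and reversed backward pass by prefix counts of
-- monotonicity violations (ascents/descents) tested by window subtraction in one ascending loop.

-- ===== PORT A =====
-- literal transliteration of A; indices in both loops are always in range, so day[i] is pyGetD (exact there)
def predictDays (day : List Int) (k : Int) : List Int :=
  let s1 := (PySem.List.pyRange 1 (day.length : Int) 1).foldl
    (fun (st : PySem.Set Int × Int) i =>
      if PySem.List.pyGetD day i 0 ≤ PySem.List.pyGetD day (i - 1) 0 then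
        let days := st.2 + 1
        (if k ≤ days then PySem.Set.add st.1 i else st.1, days)
      else (st.1, 0))
    (PySem.Set.empty, 0)
  let candidates := s1.1
  let s2 := (PySem.List.pyRange ((day.length : Int) - 2) (-1) (-1)).foldl
    (fun (st : List Int × Int) i =>
      if PySem.List.pyGetD day i 0 ≤ PySem.List.pyGetD day (i + 1) 0 then
        let days := st.2 + 1
        (if k ≤ days ∧ PySem.Set.contains candidates i = true then st.1 ++ [i + 1] else st.1, days)
      else (st.1, 0))
    (([] : List Int), 0)
  s2.1.reverse

-- ===== PORT B =====
-- literal transliteration of Source B: prefix counts of ascents/descents, then one window-check loop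
-- (inside Pre_ every index the loop uses is in range, so each subscript is pyGetD, exact there)
def predictDays_alt (day : List Int) (k : Int) : List Int :=
  let n : Int := (day.length : Int)
  let asc := (PySem.List.pyRange 1 n 1).foldl
    (fun (acc : List Int) j => acc ++ [PySem.List.pyGetD acc (-1) 0 +
      (if PySem.List.pyGetD day (j - 1) 0 < PySem.List.pyGetD day j 0 then 1 else 0)]) [0]
  let dsc := (PySem.List.pyRange 1 n 1).foldl
    (fun (acc : List Int) j => acc ++ [PySem.List.pyGetD acc (-1) 0 +
      (if PySem.List.pyGetD day j 0 < PySem.List.pyGetD day (j - 1) 0 then 1 else 0)]) [0]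
  (PySem.List.pyRange k (n - k) 1).foldl
    (fun (ans : List Int) i =>
      if PySem.List.pyGetD asc i 0 = PySem.List.pyGetD asc (i - k) 0 ∧
         PySem.List.pyGetD dsc (i + k) 0 = PySem.List.pyGetD dsc i 0
      then ans ++ [i + 1] else ans) []

-- ===== PRECONDITION & SPEC =====
-- Pre_ excludes k ≤ 0, outside the natural domain of a positive run-length threshold k; there A's
-- emission rule (it still demands a run of length ≥ 1 on each side) is an implementation artefact,
-- while B includes every index whose (trivially empty) windows fit.
def Pre_predictDays (day : List Int) (k : Int) : Prop := 1 ≤ k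
instance (day : List Int) (k : Int) : Decidable (Pre_predictDays day k) := by unfold Pre_predictDays; infer_instance
def pvWitness_predictDays : List Int × Int := ([5, 4, 3, 4, 2, 1, 2], 1)

def Spec_predictDays (day : List Int) (k : Int) (out : List Int) : Prop := out = predictDays_alt day k
instance (day : List Int) (k : Int) (out : List Int) : Decidable (Spec_predictDays day k out) := by unfold Spec_predictDays; infer_instance

-- ===== CLAIM (what is proved, stated in full; the proofs are below) =====
def Claim_equal_predictDays : Prop := ∀ (day : List Int) (k : Int), Dom_predictDays day k → Pre_predictDays day k → Spec_predictDays day k (predictDays day k)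

-- ===== LEMMAS AND PROOFS =====

-- left run length: Lrun day j = length of the non-increasing run of day ending at index j
def Lrun (day : List Int) : Nat → Int
  | 0 => 0
  | j + 1 => if day.getD (j + 1) 0 ≤ day.getD j 0 then Lrun day j + 1 else 0

-- right run length: Rrun day j = length of the non-decreasing run of day starting at index j
def Rrun (day : List Int) (j : Nat) : Int :=
  if _h : j + 1 < day.length then
    if day.getD j 0 ≤ day.getD (j + 1) 0 then Rrun day (j + 1) + 1 else 0
  else 0
termination_by day.length - j

-- prefix violation counts: Asc day j = #ascents day[t-1] < day[t] with t ≤ j; Dsc = #descents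
def Asc (day : List Int) : Nat → Int
  | 0 => 0
  | j + 1 => Asc day j + (if day.getD j 0 < day.getD (j + 1) 0 then 1 else 0)

def Dsc (day : List Int) : Nat → Int
  | 0 => 0
  | j + 1 => Dsc day j + (if day.getD (j + 1) 0 < day.getD j 0 then 1 else 0)

-- named copies of the loop bodies (definitionally what the ports fold)
def step1 (day : List Int) (k : Int) (st : PySem.Set Int × Int) (i : Int) : PySem.Set Int × Int :=
  if PySem.List.pyGetD day i 0 ≤ PySem.List.pyGetD day (i - 1) 0 then
    let days := st.2 + 1
    (if k ≤ days then PySem.Set.add st.1 i else st.1, days)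
  else (st.1, 0)

def step2 (day : List Int) (k : Int) (candidates : PySem.Set Int) (st : List Int × Int) (i : Int) : List Int × Int :=
  if PySem.List.pyGetD day i 0 ≤ PySem.List.pyGetD day (i + 1) 0 then
    let days := st.2 + 1
    (if k ≤ days ∧ PySem.Set.contains candidates i = true then st.1 ++ [i + 1] else st.1, days)
  else (st.1, 0)

def stepAsc (day : List Int) (acc : List Int) (j : Int) : List Int :=
  acc ++ [PySem.List.pyGetD acc (-1) 0 +
    (if PySem.List.pyGetD day (j - 1) 0 < PySem.List.pyGetD day j 0 then 1 else 0)]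

def stepDsc (day : List Int) (acc : List Int) (j : Int) : List Int :=
  acc ++ [PySem.List.pyGetD acc (-1) 0 +
    (if PySem.List.pyGetD day j 0 < PySem.List.pyGetD day (j - 1) 0 then 1 else 0)]

def stepComb (asc dsc : List Int) (k : Int) (ans : List Int) (i : Int) : List Int :=
  if PySem.List.pyGetD asc i 0 = PySem.List.pyGetD asc (i - k) 0 ∧
     PySem.List.pyGetD dsc (i + k) 0 = PySem.List.pyGetD dsc i 0
  then ans ++ [i + 1] else ans

def cands (day : List Int) (k : Int) : PySem.Set Int :=
  ((PySem.List.pyRange 1 (day.length : Int) 1).foldl (step1 day k) (PySem.Set.empty, 0)).1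

lemma predictDays_eq (day : List Int) (k : Int) :
    predictDays day k =
      ((PySem.List.pyRange ((day.length : Int) - 2) (-1) (-1)).foldl
        (step2 day k (cands day k)) ([], 0)).1.reverse := rfl

lemma predictDays_alt_eq (day : List Int) (k : Int) :
    predictDays_alt day k =
      (PySem.List.pyRange k ((day.length : Int) - k) 1).foldl
        (stepComb ((PySem.List.pyRange 1 ((day.length : Int)) 1).foldl (stepAsc day) [0])
                  ((PySem.List.pyRange 1 ((day.length : Int)) 1).foldl (stepDsc day) [0]) k)
        [] := rfl

lemma pass1 (day : List Int) (k : Int) (hk : 1 ≤ k) (m : Nat) :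
    ((PySem.List.pyRange 1 (1 + (m : Int)) 1).foldl (step1 day k) (PySem.Set.empty, 0)).2 = Lrun day m ∧
    ∀ x : Int, x ∈ ((PySem.List.pyRange 1 (1 + (m : Int)) 1).foldl (step1 day k) (PySem.Set.empty, 0)).1 ↔
      ∃ j : Nat, 1 ≤ j ∧ j ≤ m ∧ x = (j : Int) ∧ k ≤ Lrun day j := by
  induction m with
  | zero =>
    have h0 : (1 : Int) + ((0 : Nat) : Int) = 1 := by norm_num
    rw [h0, PySem.List.pyRange_one_eq_nil (le_refl (1 : Int)), List.foldl_nil]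
    refine ⟨rfl, ?_⟩
    intro x
    constructor
    · intro h; exact absurd h (by simp [PySem.Set.empty])
    · rintro ⟨j, hj1, hj2, _, _⟩; omega
  | succ m ih =>
    obtain ⟨ih2, ihmem⟩ := ih
    have h1 : (1 : Int) + ((m + 1 : Nat) : Int) = (1 + (m : Int)) + 1 := by push_cast; ring
    rw [h1, PySem.List.pyRange_one_succ_right (by omega), List.foldl_append, List.foldl_cons,
      List.foldl_nil]
    have hga : PySem.List.pyGetD day (1 + (m : Int)) 0 = day.getD (m + 1) 0 := by
      have h2 : (1 : Int) + (m : Int) = ((m + 1 : Nat) : Int) := by push_cast; ring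
      rw [h2, PySem.List.pyGetD_natCast]
    have hgb : PySem.List.pyGetD day (1 + (m : Int) - 1) 0 = day.getD m 0 := by
      have h2 : (1 : Int) + (m : Int) - 1 = ((m : Nat) : Int) := by push_cast; ring
      rw [h2, PySem.List.pyGetD_natCast]
    have hcast : (1 : Int) + (m : Int) = ((m + 1 : Nat) : Int) := by push_cast; ring
    simp only [step1]
    rw [hga, hgb, ih2]
    by_cases hle : day.getD (m + 1) 0 ≤ day.getD m 0
    · have hL : Lrun day (m + 1) = Lrun day m + 1 := by
        simp only [Lrun]; rw [if_pos hle]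
      simp only [hle, if_true]
      by_cases hkk : k ≤ Lrun day m + 1
      · simp only [hkk, if_true]
        refine ⟨hL.symm, ?_⟩
        intro x
        constructor
        · intro hx
          rcases (PySem.Set.mem_add _ _ _).mp hx with hx' | hx'
          · obtain ⟨j, hj1, hj2, rfl, hjk⟩ := (ihmem x).mp hx'
            exact ⟨j, hj1, by omega, rfl, hjk⟩
          · refine ⟨m + 1, by omega, le_refl _, by rw [hx', hcast], by rw [hL]; exact hkk⟩
        · rintro ⟨j, hj1, hj2, rfl, hjk⟩
          rcases Nat.lt_or_ge j (m + 1) with hjm | hjm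
          · exact (PySem.Set.mem_add _ _ _).mpr (Or.inl ((ihmem _).mpr ⟨j, hj1, by omega, rfl, hjk⟩))
          · have : j = m + 1 := by omega
            subst this
            exact (PySem.Set.mem_add _ _ _).mpr (Or.inr (by rw [hcast]))
      · simp only [hkk, if_false]
        refine ⟨hL.symm, ?_⟩
        intro x
        rw [ihmem x]
        constructor
        · rintro ⟨j, hj1, hj2, rfl, hjk⟩; exact ⟨j, hj1, by omega, rfl, hjk⟩
        · rintro ⟨j, hj1, hj2, rfl, hjk⟩
          rcases Nat.lt_or_ge j (m + 1) with hjm | hjm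
          · exact ⟨j, hj1, by omega, rfl, hjk⟩
          · have hj : j = m + 1 := by omega
            subst hj; rw [hL] at hjk; exact absurd hjk hkk
    · have hL : Lrun day (m + 1) = 0 := by
        simp only [Lrun]; rw [if_neg hle]
      simp only [hle, if_false]
      refine ⟨hL.symm, ?_⟩
      intro x
      rw [ihmem x]
      constructor
      · rintro ⟨j, hj1, hj2, rfl, hjk⟩; exact ⟨j, hj1, by omega, rfl, hjk⟩
      · rintro ⟨j, hj1, hj2, rfl, hjk⟩
        rcases Nat.lt_or_ge j (m + 1) with hjm | hjm
        · exact ⟨j, hj1, by omega, rfl, hjk⟩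
        · have hj : j = m + 1 := by omega
          subst hj; rw [hL] at hjk; omega

lemma Rrun_eq (day : List Int) (t : Nat) (h : t + 1 < day.length) :
    Rrun day t = if day.getD t 0 ≤ day.getD (t + 1) 0 then Rrun day (t + 1) + 1 else 0 := by
  rw [Rrun]; simp [h]

lemma Rrun_last (day : List Int) (t : Nat) (h : ¬ t + 1 < day.length) : Rrun day t = 0 := by
  rw [Rrun]; simp [h]

lemma pass2 (day : List Int) (k : Int) (hk : 1 ≤ k) (c : PySem.Set Int) :
    ∀ t : Nat, t + 1 ≤ day.length → ∀ ans0 : List Int,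
    (PySem.List.pyRange ((t : Int) - 1) (-1) (-1)).foldl (step2 day k c) (ans0, Rrun day t) =
      (ans0 ++ ((List.range t).reverse.filter
          (fun j => decide (k ≤ Rrun day j) && PySem.Set.contains c (j : Int))).map (fun (j : Nat) => (j : Int) + 1),
       Rrun day 0) := by
  intro t
  induction t with
  | zero => intro _ ans0; simp [PySem.List.pyRange_neg_one_eq_nil]
  | succ t ih =>
    intro ht ans0
    have hc : ((t + 1 : Nat) : Int) - 1 = (t : Int) := by push_cast; ring_nf
    rw [hc, PySem.List.pyRange_neg_one_cons (by omega), List.foldl_cons]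
    have hstep : step2 day k c (ans0, Rrun day (t + 1)) (t : Int) =
        ((ans0 ++ if decide (k ≤ Rrun day t) && PySem.Set.contains c (t : Int) then [(t : Int) + 1] else []),
         Rrun day t) := by
      have hget : PySem.List.pyGetD day (t : Int) 0 = day.getD t 0 := by
        simp [PySem.List.pyGetD_natCast]
      have hget2 : PySem.List.pyGetD day ((t : Int) + 1) 0 = day.getD (t + 1) 0 := by
        have h2 : ((t : Int) + 1) = ((t + 1 : Nat) : Int) := by push_cast; ring
        rw [h2, PySem.List.pyGetD_natCast]
      rw [step2, hget, hget2, Rrun_eq day t (by omega)]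
      by_cases hle : day.getD t 0 ≤ day.getD (t + 1) 0
      · simp only [hle, if_true]
        by_cases hcon : ((t : Int)) ∈ c <;> by_cases hkk : k ≤ Rrun day (t + 1) + 1 <;>
          simp [hcon, hkk]
      · simp only [hle, if_false]
        have : ¬ k ≤ (0 : Int) := by omega
        simp [this]
    rw [hstep, ih (by omega)]
    have hsplit : (List.range (t + 1)).reverse = t :: (List.range t).reverse := by
      rw [List.range_succ, List.reverse_append]; rfl
    rw [hsplit]
    by_cases hcond : k ≤ Rrun day t ∧ ((t : Int) ∈ c) <;>
      simp [hcond]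

lemma passAsc (day : List Int) (m : Nat) :
    (PySem.List.pyRange 1 (1 + (m : Int)) 1).foldl (stepAsc day) [0] =
      (List.range (m + 1)).map (Asc day) := by
  induction m with
  | zero => simp [PySem.List.pyRange_one_eq_nil, Asc]
  | succ m ih =>
    have h1 : (1 : Int) + ((m + 1 : Nat) : Int) = (1 + (m : Int)) + 1 := by push_cast; ring
    rw [h1, PySem.List.pyRange_one_succ_right (by omega), List.foldl_append, ih]
    have hidx : (1 : Int) + (m : Int) = ((m + 1 : Nat) : Int) := by push_cast; ring
    have hidx2 : (1 : Int) + (m : Int) - 1 = ((m : Nat) : Int) := by push_cast; ring_nf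
    have hlast : (List.range (m + 1)).map (Asc day) = (List.range m).map (Asc day) ++ [Asc day m] := by
      rw [List.range_succ, List.map_append]; rfl
    simp only [List.foldl_cons, List.foldl_nil, stepAsc, hlast,
      PySem.List.pyGetD_neg_one_append_singleton, hidx, hidx2, PySem.List.pyGetD_natCast]
    rw [List.range_succ (n := m + 1), List.map_append]
    simp [Asc, hlast]

lemma passDsc (day : List Int) (m : Nat) :
    (PySem.List.pyRange 1 (1 + (m : Int)) 1).foldl (stepDsc day) [0] =
      (List.range (m + 1)).map (Dsc day) := by
  induction m with
  | zero => simp [PySem.List.pyRange_one_eq_nil, Dsc]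
  | succ m ih =>
    have h1 : (1 : Int) + ((m + 1 : Nat) : Int) = (1 + (m : Int)) + 1 := by push_cast; ring
    rw [h1, PySem.List.pyRange_one_succ_right (by omega), List.foldl_append, ih]
    have hidx : (1 : Int) + (m : Int) = ((m + 1 : Nat) : Int) := by push_cast; ring
    have hidx2 : (1 : Int) + (m : Int) - 1 = ((m : Nat) : Int) := by push_cast; ring_nf
    have hlast : (List.range (m + 1)).map (Dsc day) = (List.range m).map (Dsc day) ++ [Dsc day m] := by
      rw [List.range_succ, List.map_append]; rfl
    simp only [List.foldl_cons, List.foldl_nil, stepDsc, hlast,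
      PySem.List.pyGetD_neg_one_append_singleton, hidx, hidx2, PySem.List.pyGetD_natCast]
    rw [List.range_succ (n := m + 1), List.map_append]
    simp [Dsc, hlast]

lemma getD_map_range' (n j : Nat) (f : Nat → Int) (d : Int) (hj : j < n) :
    (((List.range n).map f).getD j d) = f j := by
  rw [List.getD_eq_getElem?_getD]
  simp [hj]

lemma Asc_mono (day : List Int) (a d : Nat) : Asc day a ≤ Asc day (a + d) := by
  induction d with
  | zero => simp
  | succ d ih =>
    have h : Asc day (a + (d + 1)) = Asc day (a + d) +
        (if day.getD (a + d) 0 < day.getD (a + d + 1) 0 then 1 else 0) := rfl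
    rw [h]; split_ifs <;> omega

lemma Dsc_mono (day : List Int) (a d : Nat) : Dsc day a ≤ Dsc day (a + d) := by
  induction d with
  | zero => simp
  | succ d ih =>
    have h : Dsc day (a + (d + 1)) = Dsc day (a + d) +
        (if day.getD (a + d + 1) 0 < day.getD (a + d) 0 then 1 else 0) := rfl
    rw [h]; split_ifs <;> omega

lemma Lrun_nonneg (day : List Int) (j : Nat) : 0 ≤ Lrun day j := by
  induction j with
  | zero => simp [Lrun]
  | succ j ih => simp only [Lrun]; split_ifs <;> omega

lemma Lrun_le (day : List Int) (j : Nat) : Lrun day j ≤ (j : Int) := by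
  induction j with
  | zero => simp [Lrun]
  | succ j ih => simp only [Lrun]; split_ifs <;> push_cast <;> omega

lemma Rrun_bdd (day : List Int) :
    ∀ m j : Nat, day.length - j ≤ m →
      0 ≤ Rrun day j ∧ Rrun day j ≤ ((day.length - 1 - j : Nat) : Int) := by
  intro m
  induction m with
  | zero =>
    intro j hj
    rw [Rrun_last day j (by omega)]
    constructor <;> omega
  | succ m ih =>
    intro j hj
    by_cases hlt : j + 1 < day.length
    · rw [Rrun_eq day j hlt]
      split_ifs with hle
      · obtain ⟨h0, h1⟩ := ih (j + 1) (by omega)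
        constructor <;> omega
      · constructor <;> omega
    · rw [Rrun_last day j hlt]
      constructor <;> omega

-- window test ⟺ run length: no ascent in (j-d, j] iff the non-increasing run ending at j has length ≥ d
lemma asc_window (day : List Int) :
    ∀ d j : Nat, d ≤ j → ((Asc day j = Asc day (j - d)) ↔ ((d : Int) ≤ Lrun day j)) := by
  intro d
  induction d with
  | zero =>
    intro j _
    simp [Lrun_nonneg day j]
  | succ d ih =>
    intro j hd
    cases j with
    | zero => omega
    | succ j' =>
      have hd' : d ≤ j' := by omega
      by_cases hle : day.getD (j' + 1) 0 ≤ day.getD j' 0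
      · have hA : Asc day (j' + 1) = Asc day j' := by
          simp only [Asc]; rw [if_neg (not_lt.mpr hle)]; ring
        have hL : Lrun day (j' + 1) = Lrun day j' + 1 := by
          simp only [Lrun]; rw [if_pos hle]
        have hsub : j' + 1 - (d + 1) = j' - d := by omega
        rw [hA, hL, hsub]
        constructor
        · intro h
          have := (ih j' hd').mp h
          push_cast; omega
        · intro h
          apply (ih j' hd').mpr
          push_cast at h; omega
      · have hlt := not_le.mp hle
        have hA : Asc day (j' + 1) = Asc day j' + 1 := by
          simp only [Asc]; rw [if_pos hlt]
        have hL : Lrun day (j' + 1) = 0 := by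
          simp only [Lrun]; rw [if_neg hle]
        have hmono : Asc day (j' - d) ≤ Asc day j' := by
          have heq : j' - d + d = j' := by omega
          have := Asc_mono day (j' - d) d
          rwa [heq] at this
        have hsub : j' + 1 - (d + 1) = j' - d := by omega
        rw [hA, hL, hsub]
        constructor
        · intro h; omega
        · intro h; exfalso; push_cast at h; omega

-- window test ⟺ run length: no descent in [j, j+d) iff the non-decreasing run starting at j has length ≥ d
lemma dsc_window (day : List Int) :
    ∀ d j : Nat, j + d + 1 ≤ day.length → ((Dsc day (j + d) = Dsc day j) ↔ ((d : Int) ≤ Rrun day j)) := by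
  intro d
  induction d with
  | zero =>
    intro j _
    simp [(Rrun_bdd day day.length j (by omega)).1]
  | succ d ih =>
    intro j h
    have hj1 : j + 1 < day.length := by omega
    rw [Rrun_eq day j hj1]
    by_cases hle : day.getD j 0 ≤ day.getD (j + 1) 0
    · have hD1 : Dsc day (j + 1) = Dsc day j := by
        simp only [Dsc]; rw [if_neg (not_lt.mpr hle)]; ring
      have harr : j + (d + 1) = (j + 1) + d := by omega
      rw [if_pos hle, harr, ← hD1]
      constructor
      · intro hh
        have := (ih (j + 1) (by omega)).mp hh
        push_cast; omega
      · intro hh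
        apply (ih (j + 1) (by omega)).mpr
        push_cast at hh; omega
    · have hlt := not_le.mp hle
      have hD1 : Dsc day (j + 1) = Dsc day j + 1 := by
        simp only [Dsc]; rw [if_pos hlt]
      have hmono := Dsc_mono day (j + 1) d
      have harr : j + (d + 1) = (j + 1) + d := by omega
      rw [if_neg hle, harr]
      constructor
      · intro hh; exfalso; omega
      · intro hh; exfalso; push_cast at hh; omega

set_option maxRecDepth 4000 in
lemma passComb (day : List Int) (kN : Nat) :
    ∀ m : Nat, kN + m + kN ≤ day.length →
    (PySem.List.pyRange (kN : Int) ((kN : Int) + (m : Int)) 1).foldl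
      (stepComb ((List.range day.length).map (Asc day)) ((List.range day.length).map (Dsc day)) (kN : Int)) []
    = ((List.range' kN m).filter
        (fun j => decide (Asc day j = Asc day (j - kN)) && decide (Dsc day (j + kN) = Dsc day j))).map
      (fun (j : Nat) => (j : Int) + 1) := by
  intro m
  induction m with
  | zero =>
    intro _
    have h0 : (kN : Int) + ((0 : Nat) : Int) = (kN : Int) := by push_cast; ring
    rw [h0, PySem.List.pyRange_one_eq_nil (le_refl _), List.foldl_nil]
    rfl
  | succ m ih =>
    intro h
    have h1 : (kN : Int) + ((m + 1 : Nat) : Int) = ((kN : Int) + (m : Int)) + 1 := by push_cast; ring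
    rw [h1, PySem.List.pyRange_one_succ_right (by omega), List.foldl_append, List.foldl_cons,
      List.foldl_nil, ih (by omega)]
    have hbound1 : kN + m < day.length := by omega
    have hbound2 : m < day.length := by omega
    have hbound3 : kN + m + kN < day.length := by omega
    have hcA : (kN : Int) + (m : Int) = ((kN + m : Nat) : Int) := by push_cast; ring
    have hcB : (kN : Int) + (m : Int) - (kN : Int) = ((m : Nat) : Int) := by push_cast; ring
    have hcC : (kN : Int) + (m : Int) + (kN : Int) = ((kN + m + kN : Nat) : Int) := by push_cast; ring
    have hgA : PySem.List.pyGetD ((List.range day.length).map (Asc day)) ((kN : Int) + (m : Int)) 0 =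
        Asc day (kN + m) := by
      rw [hcA, PySem.List.pyGetD_natCast, getD_map_range' _ _ _ _ hbound1]
    have hgB : PySem.List.pyGetD ((List.range day.length).map (Asc day)) ((kN : Int) + (m : Int) - (kN : Int)) 0 =
        Asc day m := by
      rw [hcB, PySem.List.pyGetD_natCast, getD_map_range' _ _ _ _ hbound2]
    have hgC : PySem.List.pyGetD ((List.range day.length).map (Dsc day)) ((kN : Int) + (m : Int) + (kN : Int)) 0 =
        Dsc day (kN + m + kN) := by
      rw [hcC, PySem.List.pyGetD_natCast, getD_map_range' _ _ _ _ hbound3]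
    have hgD : PySem.List.pyGetD ((List.range day.length).map (Dsc day)) ((kN : Int) + (m : Int)) 0 =
        Dsc day (kN + m) := by
      rw [hcA, PySem.List.pyGetD_natCast, getD_map_range' _ _ _ _ hbound1]
    have hr' : List.range' kN (m + 1) = List.range' kN m ++ [kN + m] := by
      have := List.range'_concat (s := kN) (n := m) (step := 1)
      simpa using this
    have hsub : kN + m - kN = m := by omega
    rw [hr']
    simp only [stepComb, hgA, hgB, hgC, hgD, List.filter_append, List.map_append, List.filter_cons,
      List.filter_nil, hsub]
    by_cases hcond : Asc day (kN + m) = Asc day m ∧ Dsc day (kN + m + kN) = Dsc day (kN + m)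
    · rw [if_pos hcond, if_pos (by simp [hcond.1, hcond.2])]
      simp only [List.map_cons, List.map_nil]
      rw [hcA]
    · rw [if_neg hcond]
      have : (decide (Asc day (kN + m) = Asc day m) &&
          decide (Dsc day (kN + m + kN) = Dsc day (kN + m))) = false := by
        rcases not_and_or.mp hcond with hx | hx <;> simp [hx]
      rw [this]
      simp

-- ===== VERDICT (by name: the statement is the Claim_ definition above) =====
theorem predictDays_spec : Claim_equal_predictDays := by
  intro day k hDom hk
  unfold Pre_predictDays at hk
  unfold Spec_predictDays
  obtain ⟨kN, rfl⟩ : ∃ kN : Nat, k = (kN : Int) := ⟨k.toNat, by omega⟩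
  have hk1 : 1 ≤ kN := by exact_mod_cast hk
  rcases Nat.lt_or_ge day.length 2 with hn | hn
  · rw [predictDays_eq, predictDays_alt_eq,
      PySem.List.pyRange_neg_one_eq_nil (show ((day.length : Int)) - 2 ≤ -1 from by omega),
      PySem.List.pyRange_one_eq_nil (show ((day.length : Int)) - (kN : Int) ≤ (kN : Int) from by omega)]
    rfl
  · rw [predictDays_eq, predictDays_alt_eq]
    have hR0 : Rrun day (day.length - 1) = 0 := Rrun_last _ _ (by omega)
    have hn1 : ((day.length : Int)) - 2 = ((day.length - 1 : Nat) : Int) - 1 := by omega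
    rw [hn1]
    -- A side: characterize as a forward filter over range (length - 1)
    have hA := pass2 day (kN : Int) hk (cands day (kN : Int)) (day.length - 1) (by omega) []
    rw [hR0] at hA
    rw [hA, List.nil_append, List.filter_reverse, List.map_reverse, List.reverse_reverse]
    -- B side: asc/dsc arrays
    have hcl : ((day.length : Int)) = 1 + ((day.length - 1 : Nat) : Int) := by omega
    have hAsc := passAsc day (day.length - 1)
    have hDsc := passDsc day (day.length - 1)
    rw [← hcl, show day.length - 1 + 1 = day.length from by omega] at hAsc hDsc
    rw [hAsc, hDsc]
    -- candidate-set membership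
    have hcands : ∀ jj : Nat, jj ≤ day.length - 1 →
        (((jj : Int) ∈ cands day (kN : Int)) ↔ (1 ≤ jj ∧ (kN : Int) ≤ Lrun day jj)) := by
      intro jj hjj
      unfold cands
      rw [hcl, (pass1 day (kN : Int) hk (day.length - 1)).2]
      constructor
      · rintro ⟨j', h1, h2, hc', hkL⟩
        have hjj' : jj = j' := by exact_mod_cast hc'
        subst hjj'; exact ⟨h1, hkL⟩
      · rintro ⟨h1, hkL⟩; exact ⟨jj, h1, hjj, rfl, hkL⟩
    -- A's filter predicate ↔ the window predicate (with the in-range bounds)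
    have hAfil : (List.range (day.length - 1)).filter
          (fun j => decide ((kN : Int) ≤ Rrun day j) && PySem.Set.contains (cands day (kN : Int)) (j : Int)) =
        (List.range (day.length - 1)).filter
          (fun j => decide (kN ≤ j) && decide (j + kN + 1 ≤ day.length) &&
            (decide (Asc day j = Asc day (j - kN)) && decide (Dsc day (j + kN) = Dsc day j))) := by
      apply List.filter_congr
      intro j hj
      have hjlt : j < day.length - 1 := List.mem_range.mp hj
      rw [Bool.eq_iff_iff]
      simp only [Bool.and_eq_true, decide_eq_true_eq, PySem.Set.contains_iff,
        hcands j (by omega)]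
      constructor
      · rintro ⟨hR, h1, hL⟩
        have hbL : kN ≤ j := by
          have := Lrun_le day j; omega
        have hbR : j + kN + 1 ≤ day.length := by
          have := (Rrun_bdd day day.length j (by omega)).2; omega
        exact ⟨⟨hbL, hbR⟩, (asc_window day kN j hbL).mpr hL,
          (dsc_window day kN j hbR).mpr hR⟩
      · rintro ⟨⟨hbL, hbR⟩, hAw, hDw⟩
        exact ⟨(dsc_window day kN j hbR).mp hDw, by omega,
          (asc_window day kN j hbL).mp hAw⟩
    rw [hAfil]
    rcases Nat.lt_or_ge day.length (2 * kN + 1) with hsm | hbg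
    · -- too short for any window: both sides empty
      rw [PySem.List.pyRange_one_eq_nil
        (show ((day.length : Int)) - (kN : Int) ≤ (kN : Int) from by omega), List.foldl_nil]
      have : (List.range (day.length - 1)).filter
          (fun j => decide (kN ≤ j) && decide (j + kN + 1 ≤ day.length) &&
            (decide (Asc day j = Asc day (j - kN)) && decide (Dsc day (j + kN) = Dsc day j))) = [] := by
        rw [List.filter_eq_nil_iff]
        intro j hj
        simp only [Bool.and_eq_true, decide_eq_true_eq, not_and]
        rintro ⟨hbL, hbR⟩
        omega
      rw [this]
      rfl
    · -- the generic case: use passComb with m = length - 2k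
      have hnk : ((day.length : Int)) - (kN : Int) = (kN : Int) + ((day.length - 2 * kN : Nat) : Int) := by
        omega
      rw [hnk, passComb day kN (day.length - 2 * kN) (by omega)]
      -- split range (length - 1) into the part below k, the window part, and the part above
      have hsplit : List.range (day.length - 1) =
          List.range' 0 kN ++ List.range' kN (day.length - 2 * kN) ++
            List.range' (kN + (day.length - 2 * kN)) (kN - 1) := by
        rw [List.range_eq_range']
        have h2 := List.range'_append (s := kN) (m := day.length - 2 * kN) (n := kN - 1) (step := 1)
        simp only [one_mul] at h2
        rw [List.append_assoc, h2]
        have h3 := List.range'_append (s := 0) (m := kN) (n := day.length - 2 * kN + (kN - 1)) (step := 1)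
        simp only [one_mul, Nat.zero_add] at h3
        rw [h3]
        congr 1
        omega
      rw [hsplit, List.filter_append, List.filter_append, List.map_append, List.map_append]
      have hleft : (List.range' 0 kN).filter
          (fun j => decide (kN ≤ j) && decide (j + kN + 1 ≤ day.length) &&
            (decide (Asc day j = Asc day (j - kN)) && decide (Dsc day (j + kN) = Dsc day j))) = [] := by
        rw [List.filter_eq_nil_iff]
        intro j hj
        have := List.mem_range'_1.mp hj
        simp only [Bool.and_eq_true, decide_eq_true_eq, not_and]
        rintro ⟨hbL, hbR⟩
        omega
      have hright : (List.range' (kN + (day.length - 2 * kN)) (kN - 1)).filter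
          (fun j => decide (kN ≤ j) && decide (j + kN + 1 ≤ day.length) &&
            (decide (Asc day j = Asc day (j - kN)) && decide (Dsc day (j + kN) = Dsc day j))) = [] := by
        rw [List.filter_eq_nil_iff]
        intro j hj
        have := List.mem_range'_1.mp hj
        simp only [Bool.and_eq_true, decide_eq_true_eq, not_and]
        rintro ⟨hbL, hbR⟩
        omega
      have hmid : (List.range' kN (day.length - 2 * kN)).filter
          (fun j => decide (kN ≤ j) && decide (j + kN + 1 ≤ day.length) &&
            (decide (Asc day j = Asc day (j - kN)) && decide (Dsc day (j + kN) = Dsc day j))) =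
          (List.range' kN (day.length - 2 * kN)).filter
            (fun j => decide (Asc day j = Asc day (j - kN)) && decide (Dsc day (j + kN) = Dsc day j)) := by
        apply List.filter_congr
        intro j hj
        have hm := List.mem_range'_1.mp hj
        have hb1 : kN ≤ j := hm.1
        have hb2 : j + kN + 1 ≤ day.length := by omega
        simp [hb1, hb2]
      rw [hleft, hright, hmid, List.map_nil, List.nil_append, List.append_nil]
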